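-- pv_equiv track=rewrite | github.com/VictorCallegari/desafio-python | desafio.py | verificar_restricoes
-- ===== SOURCE A (Python) =====
-- investimentos = [
--     {"Opção": 1, "Descrição": "Ampliação da capacidade do armazém ZDP em 5%", "Custo": 470000, "Retorno": 410000, "Risco": "Baixo"},
--     {"Opção": 2, "Descrição": "Ampliação da capacidade do armazém MGL em 7%", "Custo": 400000, "Retorno": 330000, "Risco": "Baixo"},
--     {"Opção": 3, "Descrição": "Compra de empilhadeira", "Custo": 170000, "Retorno": 140000, "Risco": "Médio"},
--     {"Opção": 4, "Descrição": "Projeto de P&D I", "Custo": 270000, "Retorno": 250000, "Risco": "Médio"},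
--     {"Opção": 5, "Descrição": "Projeto de P&D II", "Custo": 340000, "Retorno": 320000, "Risco": "Médio"},
--     {"Opção": 6, "Descrição": "Aquisição de novos equipamentos", "Custo": 230000, "Retorno": 320000, "Risco": "Médio"},
--     {"Opção": 7, "Descrição": "Capacitação de funcionários", "Custo": 50000, "Retorno": 90000, "Risco": "Médio"},
--     {"Opção": 8, "Descrição": "Ampliação da estrutura de carga rodoviária", "Custo": 440000, "Retorno": 190000, "Risco": "Alto"},
--     {"Opção": 9, "Descrição": "Construção de datacenter", "Custo": 320000, "Retorno": 120000, "Risco": "Alto"},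
--     {"Opção": 10, "Descrição": "Aquisição de empresa concorrente", "Custo": 800000, "Retorno": 450000, "Risco": "Alto"},
--     {"Opção": 11, "Descrição": "Compra de serviços em nuvem", "Custo": 120000, "Retorno": 80000, "Risco": "Baixo"},
--     {"Opção": 12, "Descrição": "Criação de aplicativo mobile e desktop", "Custo": 150000, "Retorno": 120000, "Risco": "Baixo"},
--     {"Opção": 13, "Descrição": "Terceirizar serviço de otimização da logística", "Custo": 300000, "Retorno": 380000, "Risco": "Médio"}
-- ]
--
-- teto_custo = {
--     "Baixo": 1200000,
--     "Médio": 1500000,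
--     "Alto": 900000
-- }
--
-- teto_minimo = {
--     "Baixo": 2,
--     "Médio": 2,
--     "Alto": 1
-- }
--
-- capital_disponivel = 2400000
--
-- def verificar_restricoes(sol):
--     categorias = {"Baixo": 0, "Médio": 0, "Alto": 0}
--     total_selecionado = 0
--     for i in range(len(investimentos)):
--         if sol[i] == 1:
--             categorias[investimentos[i]["Risco"]] += 1
--             total_selecionado += 1
--     for risco in categorias:
--         if categorias[risco] < teto_minimo[risco]:
--             return False
--         custo_total = sum(investimentos[i]["Custo"] for i in range(len(investimentos)) if sol[i] == 1 and investimentos[i]["Risco"] == risco)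
--         if custo_total > teto_custo[risco]:
--             return False
--     custo_total = sum(investimentos[i]["Custo"] for i in range(len(investimentos)) if sol[i] == 1)
--     if custo_total > capital_disponivel:
--         return False
--     return total_selecionado == 5
-- ===== SOURCE B (Python) =====
-- investimentos = [
--     {"Opção": 1, "Descrição": "Ampliação da capacidade do armazém ZDP em 5%", "Custo": 470000, "Retorno": 410000, "Risco": "Baixo"},
--     {"Opção": 2, "Descrição": "Ampliação da capacidade do armazém MGL em 7%", "Custo": 400000, "Retorno": 330000, "Risco": "Baixo"},
--     {"Opção": 3, "Descrição": "Compra de empilhadeira", "Custo": 170000, "Retorno": 140000, "Risco": "Médio"},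
--     {"Opção": 4, "Descrição": "Projeto de P&D I", "Custo": 270000, "Retorno": 250000, "Risco": "Médio"},
--     {"Opção": 5, "Descrição": "Projeto de P&D II", "Custo": 340000, "Retorno": 320000, "Risco": "Médio"},
--     {"Opção": 6, "Descrição": "Aquisição de novos equipamentos", "Custo": 230000, "Retorno": 320000, "Risco": "Médio"},
--     {"Opção": 7, "Descrição": "Capacitação de funcionários", "Custo": 50000, "Retorno": 90000, "Risco": "Médio"},
--     {"Opção": 8, "Descrição": "Ampliação da estrutura de carga rodoviária", "Custo": 440000, "Retorno": 190000, "Risco": "Alto"},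
--     {"Opção": 9, "Descrição": "Construção de datacenter", "Custo": 320000, "Retorno": 120000, "Risco": "Alto"},
--     {"Opção": 10, "Descrição": "Aquisição de empresa concorrente", "Custo": 800000, "Retorno": 450000, "Risco": "Alto"},
--     {"Opção": 11, "Descrição": "Compra de serviços em nuvem", "Custo": 120000, "Retorno": 80000, "Risco": "Baixo"},
--     {"Opção": 12, "Descrição": "Criação de aplicativo mobile e desktop", "Custo": 150000, "Retorno": 120000, "Risco": "Baixo"},
--     {"Opção": 13, "Descrição": "Terceirizar serviço de otimização da logística", "Custo": 300000, "Retorno": 380000, "Risco": "Médio"}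
-- ]
--
-- teto_custo = {
--     "Baixo": 1200000,
--     "Médio": 1500000,
--     "Alto": 900000
-- }
--
-- teto_minimo = {
--     "Baixo": 2,
--     "Médio": 2,
--     "Alto": 1
-- }
--
-- capital_disponivel = 2400000
--
--
-- def verificar_restricoes(sol):
--     # One pass over the investments collecting every aggregate at once,
--     # then pure constraint checks (A re-scans the whole list once per risk
--     # category and once more for the grand total).
--     contagem = {r: 0 for r in teto_custo}
--     custos = {r: 0 for r in teto_custo}
--     total_selecionado = 0
--     for i in range(len(investimentos)):
--         if sol[i] == 1:
--             inv = investimentos[i]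
--             contagem[inv["Risco"]] += 1
--             custos[inv["Risco"]] += inv["Custo"]
--             total_selecionado += 1
--     if any(contagem[r] < teto_minimo[r] or custos[r] > teto_custo[r] for r in teto_custo):
--         return False
--     if sum(custos.values()) > capital_disponivel:
--         return False
--     return total_selecionado == 5
-- ===== Notes on version B (the rewrite author's own statement) =====
-- stated objective: simpler
-- what changed: A scans the investment list four times (count loop, one cost-sum generator per risk category, and a grand-total generator); B makes a single pass accumulating the category counts, per-risk cost sums and the total at once, then performs pure constraint checks.
import Mathlib
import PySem

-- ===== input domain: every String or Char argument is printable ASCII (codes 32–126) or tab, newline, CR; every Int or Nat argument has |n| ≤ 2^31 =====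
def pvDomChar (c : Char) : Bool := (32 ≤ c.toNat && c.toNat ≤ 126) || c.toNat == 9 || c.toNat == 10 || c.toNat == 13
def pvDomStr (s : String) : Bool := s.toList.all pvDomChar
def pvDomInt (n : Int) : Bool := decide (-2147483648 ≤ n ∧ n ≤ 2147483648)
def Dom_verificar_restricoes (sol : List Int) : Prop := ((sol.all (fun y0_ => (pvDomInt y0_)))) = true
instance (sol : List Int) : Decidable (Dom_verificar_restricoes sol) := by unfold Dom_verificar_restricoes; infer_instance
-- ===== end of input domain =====

-- B replaces A's four scans over the investment list (count loop + one cost scan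
-- per risk category + a grand-total scan) by ONE pass accumulating counts, per-risk
-- costs and the total, followed by pure checks; return values are proved equal.

-- ===== PORT A =====
-- module constant 'investimentos', keeping only the fields the function reads: (Custo, Risco)
def pvInvs : List (Int × String) :=
  [(470000, "Baixo"), (400000, "Baixo"), (170000, "Médio"), (270000, "Médio"),
   (340000, "Médio"), (230000, "Médio"), (50000, "Médio"), (440000, "Alto"),
   (320000, "Alto"), (800000, "Alto"), (120000, "Baixo"), (150000, "Baixo"),
   (300000, "Médio")]

def pvTetoCusto : PySem.Dict String Int :=
  PySem.Dict.ofList [("Baixo", 1200000), ("Médio", 1500000), ("Alto", 900000)]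

def pvTetoMinimo : PySem.Dict String Int :=
  PySem.Dict.ofList [("Baixo", 2), ("Médio", 2), ("Alto", 1)]

def pvCapital : Int := 2400000

-- body of A's first for-loop: categorias[risco] += 1; total_selecionado += 1
def pvStepA (sol : List Int) (st : PySem.Dict String Int × Int) (i : Int) :
    PySem.Dict String Int × Int :=
  if (PySem.List.pyGet? sol i).getD 0 == 1 then
    let r := ((PySem.List.pyGet? pvInvs i).getD (0, "")).2
    (st.1.insert r (st.1.getD r 0 + 1), st.2 + 1)
  else st

-- sum(investimentos[i]["Custo"] for i in range(len(investimentos)) if sol[i] == 1 and investimentos[i]["Risco"] == risco)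
def pvCustoRisco (sol : List Int) (risco : String) : Int :=
  (((PySem.List.pyRange 0 (pvInvs.length : Int) 1).filter (fun i =>
      ((PySem.List.pyGet? sol i).getD 0 == 1) &&
      (((PySem.List.pyGet? pvInvs i).getD (0, "")).2 == risco))).map
    (fun i => ((PySem.List.pyGet? pvInvs i).getD (0, "")).1)).sum

-- sum(investimentos[i]["Custo"] for i in range(len(investimentos)) if sol[i] == 1)
def pvCustoTotal (sol : List Int) : Int :=
  (((PySem.List.pyRange 0 (pvInvs.length : Int) 1).filter (fun i =>
      (PySem.List.pyGet? sol i).getD 0 == 1)).map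
    (fun i => ((PySem.List.pyGet? pvInvs i).getD (0, "")).1)).sum

-- A's second for-loop (over the keys of categorias) with its early returns,
-- followed by the code after the loop
def pvLoop2 (sol : List Int) (categorias : PySem.Dict String Int) (total : Int) :
    List String → Bool
  | [] => if pvCustoTotal sol > pvCapital then false else total == 5
  | r :: rs =>
    if categorias.getD r 0 < pvTetoMinimo.getD r 0 then false
    else if pvCustoRisco sol r > pvTetoCusto.getD r 0 then false
    else pvLoop2 sol categorias total rs

def verificar_restricoes (sol : List Int) : Bool :=
  let st := (PySem.List.pyRange 0 (pvInvs.length : Int) 1).foldl (pvStepA sol)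
      (PySem.Dict.ofList [("Baixo", 0), ("Médio", 0), ("Alto", 0)], 0)
  pvLoop2 sol st.1 st.2 st.1.keys

-- ===== PORT B =====
-- body of B's single for-loop: update count dict, cost dict and total at once
def pvStepB (sol : List Int) (st : PySem.Dict String Int × PySem.Dict String Int × Int)
    (i : Int) : PySem.Dict String Int × PySem.Dict String Int × Int :=
  if (PySem.List.pyGet? sol i).getD 0 == 1 then
    let inv := (PySem.List.pyGet? pvInvs i).getD (0, "")
    (st.1.insert inv.2 (st.1.getD inv.2 0 + 1),
     st.2.1.insert inv.2 (st.2.1.getD inv.2 0 + inv.1),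
     st.2.2 + 1)
  else st

def verificar_restricoes_alt (sol : List Int) : Bool :=
  let zeros : PySem.Dict String Int :=
    PySem.Dict.ofList (pvTetoCusto.keys.map (fun r => (r, (0 : Int))))
  let st := (PySem.List.pyRange 0 (pvInvs.length : Int) 1).foldl (pvStepB sol)
      (zeros, zeros, 0)
  if pvTetoCusto.keys.any (fun r =>
      st.1.getD r 0 < pvTetoMinimo.getD r 0 || st.2.1.getD r 0 > pvTetoCusto.getD r 0) then
    false
  else if st.2.1.values.sum > pvCapital then false
  else st.2.2 == 5

-- ===== PRECONDITION & SPEC =====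
-- Python A indexes sol[i] for i in range(13): a shorter list raises IndexError (B too).
def Pre_verificar_restricoes (sol : List Int) : Prop := 13 ≤ sol.length
instance (sol : List Int) : Decidable (Pre_verificar_restricoes sol) := by
  unfold Pre_verificar_restricoes; infer_instance

def pvWitness_verificar_restricoes : List Int := [1, 1, 1, 1, 1, 0, 0, 1, 0, 0, 0, 0, 0]

def Spec_verificar_restricoes (sol : List Int) (out : Bool) : Prop :=
  out = verificar_restricoes_alt sol
instance (sol : List Int) (out : Bool) : Decidable (Spec_verificar_restricoes sol out) := by
  unfold Spec_verificar_restricoes; infer_instance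

-- ===== CLAIM (what is proved, stated in full; the proofs are below) =====
def Claim_equal_verificar_restricoes : Prop :=
  ∀ (sol : List Int), Dom_verificar_restricoes sol → Pre_verificar_restricoes sol →
    Spec_verificar_restricoes sol (verificar_restricoes sol)

-- ===== LEMMAS AND PROOFS =====

-- both loops update the count dict and the running total identically
theorem pv_count_total_eq (sol : List Int) (is : List Int) :
    ∀ (d c : PySem.Dict String Int) (t : Int),
      (is.foldl (pvStepA sol) (d, t)).1 = (is.foldl (pvStepB sol) (d, c, t)).1 ∧
      (is.foldl (pvStepA sol) (d, t)).2 = (is.foldl (pvStepB sol) (d, c, t)).2.2 := by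
  induction is with
  | nil => exact fun d c t => ⟨rfl, rfl⟩
  | cons i is ih =>
    intro d c t
    simp only [List.foldl, pvStepA, pvStepB]
    by_cases h : ((PySem.List.pyGet? sol i).getD 0 == 1) = true
    · simp only [h, if_true]; exact ih _ _ _
    · simp only [Bool.not_eq_true] at h
      simp only [h, Bool.false_eq_true, if_false]
      exact ih _ _ _

-- A's loop never adds a key: every risk is already a key of categorias
theorem pv_keysA (sol : List Int) (is : List Int) :
    ∀ (d : PySem.Dict String Int) (t : Int),
      (∀ i ∈ is, d.contains (((PySem.List.pyGet? pvInvs i).getD (0, "")).2) = true) →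
      (is.foldl (pvStepA sol) (d, t)).1.keys = d.keys := by
  induction is with
  | nil => intro d t _; rfl
  | cons i is ih =>
    intro d t hmem
    simp only [List.foldl, pvStepA]
    by_cases h : ((PySem.List.pyGet? sol i).getD 0 == 1) = true
    · simp only [h, if_true]
      have hc := hmem i (by simp)
      rw [ih _ _ ?_, PySem.Dict.keys_insert_of_contains _ _ hc]
      intro j hj
      rw [PySem.Dict.contains_insert]
      simp [hmem j (List.mem_cons_of_mem _ hj)]
    · simp only [Bool.not_eq_true] at h
      simp only [h, Bool.false_eq_true, if_false]
      exact ih _ _ (fun j hj => hmem j (List.mem_cons_of_mem _ hj))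

-- B's loop never adds a key to the cost dict either
theorem pv_keysB (sol : List Int) (is : List Int) :
    ∀ (d c : PySem.Dict String Int) (t : Int),
      (∀ i ∈ is, c.contains (((PySem.List.pyGet? pvInvs i).getD (0, "")).2) = true) →
      (is.foldl (pvStepB sol) (d, c, t)).2.1.keys = c.keys := by
  induction is with
  | nil => intro d c t _; rfl
  | cons i is ih =>
    intro d c t hmem
    simp only [List.foldl, pvStepB]
    by_cases h : ((PySem.List.pyGet? sol i).getD 0 == 1) = true
    · simp only [h, if_true]
      have hc := hmem i (by simp)
      rw [ih _ _ _ ?_, PySem.Dict.keys_insert_of_contains _ _ hc]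
      intro j hj
      rw [PySem.Dict.contains_insert]
      simp [hmem j (List.mem_cons_of_mem _ hj)]
    · simp only [Bool.not_eq_true] at h
      simp only [h, Bool.false_eq_true, if_false]
      exact ih _ _ _ (fun j hj => hmem j (List.mem_cons_of_mem _ hj))

-- B's cost dict accumulates exactly A's per-risk generator sum
theorem pv_cost_char (sol : List Int) (r : String) (is : List Int) :
    ∀ (d c : PySem.Dict String Int) (t : Int),
      (is.foldl (pvStepB sol) (d, c, t)).2.1.getD r 0 =
        c.getD r 0 +
        ((is.filter (fun i =>
            ((PySem.List.pyGet? sol i).getD 0 == 1) &&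
            (((PySem.List.pyGet? pvInvs i).getD (0, "")).2 == r))).map
          (fun i => ((PySem.List.pyGet? pvInvs i).getD (0, "")).1)).sum := by
  induction is with
  | nil => intro d c t; simp
  | cons i is ih =>
    intro d c t
    simp only [List.foldl, pvStepB, List.filter]
    by_cases h : ((PySem.List.pyGet? sol i).getD 0 == 1) = true
    · simp only [h, if_true, Bool.true_and]
      by_cases hr : ((PySem.List.pyGet? pvInvs i).getD (0, "")).2 = r
      · simp only [hr, beq_self_eq_true, List.map_cons, List.sum_cons]
        rw [ih]
        rw [PySem.Dict.getD_insert_self]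
        ring
      · have : (((PySem.List.pyGet? pvInvs i).getD (0, "")).2 == r) = false := by
          simpa using hr
        simp only [this]
        rw [ih, PySem.Dict.getD_insert_of_ne _ _ _ (fun hh => hr hh.symm)]
    · simp only [Bool.not_eq_true] at h
      simp only [h, Bool.false_eq_true, if_false, Bool.false_and]
      exact ih _ _ _

-- the grand total is the sum of the three per-risk totals
theorem pv_partition (sol : List Int) (is : List Int)
    (hr : ∀ i ∈ is, ((PySem.List.pyGet? pvInvs i).getD (0, "")).2 = "Baixo" ∨
          ((PySem.List.pyGet? pvInvs i).getD (0, "")).2 = "Médio" ∨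
          ((PySem.List.pyGet? pvInvs i).getD (0, "")).2 = "Alto") :
    ((is.filter (fun i => (PySem.List.pyGet? sol i).getD 0 == 1)).map
        (fun i => ((PySem.List.pyGet? pvInvs i).getD (0, "")).1)).sum =
    ((is.filter (fun i =>
        ((PySem.List.pyGet? sol i).getD 0 == 1) &&
        (((PySem.List.pyGet? pvInvs i).getD (0, "")).2 == "Baixo"))).map
      (fun i => ((PySem.List.pyGet? pvInvs i).getD (0, "")).1)).sum +
    ((is.filter (fun i =>
        ((PySem.List.pyGet? sol i).getD 0 == 1) &&
        (((PySem.List.pyGet? pvInvs i).getD (0, "")).2 == "Médio"))).map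
      (fun i => ((PySem.List.pyGet? pvInvs i).getD (0, "")).1)).sum +
    ((is.filter (fun i =>
        ((PySem.List.pyGet? sol i).getD 0 == 1) &&
        (((PySem.List.pyGet? pvInvs i).getD (0, "")).2 == "Alto"))).map
      (fun i => ((PySem.List.pyGet? pvInvs i).getD (0, "")).1)).sum := by
  induction is with
  | nil => simp
  | cons i is ih =>
    have ih' := ih (fun j hj => hr j (List.mem_cons_of_mem _ hj))
    simp only [List.filter]
    by_cases h : ((PySem.List.pyGet? sol i).getD 0 == 1) = true
    · simp only [h, Bool.true_and]
      rcases hr i (by simp) with h1 | h1 | h1 <;>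
        simp [h1, ih'] <;> ring
    · simp only [Bool.not_eq_true] at h
      simp only [h, Bool.false_and]
      exact ih'

theorem pv_range13 : PySem.List.pyRange 0 (pvInvs.length : Int) 1 =
    [0, 1, 2, 3, 4, 5, 6, 7, 8, 9, 10, 11, 12] := by decide

-- ===== VERDICT (by name: the statement is the Claim_ definition above) =====
theorem verificar_restricoes_spec : Claim_equal_verificar_restricoes := by
  intro sol _ _
  show verificar_restricoes sol = verificar_restricoes_alt sol
  unfold verificar_restricoes verificar_restricoes_alt
  rw [pv_range13]
  have hzeros : PySem.Dict.ofList (pvTetoCusto.keys.map (fun r => (r, (0 : Int)))) =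
      PySem.Dict.ofList [("Baixo", 0), ("Médio", 0), ("Alto", 0)] := by decide
  rw [hzeros]
  set L : List Int := [0,1,2,3,4,5,6,7,8,9,10,11,12] with hL
  set d0 : PySem.Dict String Int := PySem.Dict.ofList [("Baixo", 0), ("Médio", 0), ("Alto", 0)] with hd0
  obtain ⟨hd, ht⟩ := pv_count_total_eq sol L d0 d0 0
  have hkA : (L.foldl (pvStepA sol) (d0, 0)).1.keys = ["Baixo", "Médio", "Alto"] := by
    rw [pv_keysA sol L d0 0 (by decide)]; decide
  have hkB : (L.foldl (pvStepB sol) (d0, d0, 0)).2.1.keys = ["Baixo", "Médio", "Alto"] := by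
    rw [pv_keysB sol L d0 d0 0 (by decide)]; decide
  have hcost : ∀ r : String, (L.foldl (pvStepB sol) (d0, d0, 0)).2.1.getD r 0 =
      d0.getD r 0 + ((L.filter (fun i =>
        ((PySem.List.pyGet? sol i).getD 0 == 1) &&
        (((PySem.List.pyGet? pvInvs i).getD (0, "")).2 == r))).map
        (fun i => ((PySem.List.pyGet? pvInvs i).getD (0, "")).1)).sum :=
    fun r => pv_cost_char sol r L d0 d0 0
  simp only []
  rw [hkA, hd, ht]
  have hkT : pvTetoCusto.keys = ["Baixo", "Médio", "Alto"] := by decide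
  rw [hkT]
  have hv : (L.foldl (pvStepB sol) (d0, d0, 0)).2.1.values =
      ["Baixo", "Médio", "Alto"].map (fun k => (L.foldl (pvStepB sol) (d0, d0, 0)).2.1.getD k 0) := by
    rw [← hkB]; exact PySem.Dict.values_eq_map_keys _ (by rw [hkB]; decide) 0
  rw [hv]
  simp only [pvLoop2, List.any, List.map, List.sum_cons, List.sum_nil]
  have hB : pvCustoRisco sol "Baixo" = (L.foldl (pvStepB sol) (d0, d0, 0)).2.1.getD "Baixo" 0 := by
    rw [hcost, show d0.getD "Baixo" 0 = (0 : Int) from by decide, zero_add]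
    simp only [pvCustoRisco, pv_range13, hL]
  have hM : pvCustoRisco sol "Médio" = (L.foldl (pvStepB sol) (d0, d0, 0)).2.1.getD "Médio" 0 := by
    rw [hcost, show d0.getD "Médio" 0 = (0 : Int) from by decide, zero_add]
    simp only [pvCustoRisco, pv_range13, hL]
  have hA : pvCustoRisco sol "Alto" = (L.foldl (pvStepB sol) (d0, d0, 0)).2.1.getD "Alto" 0 := by
    rw [hcost, show d0.getD "Alto" 0 = (0 : Int) from by decide, zero_add]
    simp only [pvCustoRisco, pv_range13, hL]
  have hsum : pvCustoTotal sol =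
      (L.foldl (pvStepB sol) (d0, d0, 0)).2.1.getD "Baixo" 0 +
        ((L.foldl (pvStepB sol) (d0, d0, 0)).2.1.getD "Médio" 0 +
          ((L.foldl (pvStepB sol) (d0, d0, 0)).2.1.getD "Alto" 0 + 0)) := by
    simp only [pvCustoTotal, pv_range13, hL]
    rw [pv_partition sol L (by decide), hcost, hcost, hcost,
      show d0.getD "Baixo" 0 = (0 : Int) from by decide,
      show d0.getD "Médio" 0 = (0 : Int) from by decide,
      show d0.getD "Alto" 0 = (0 : Int) from by decide]
    ring
  rw [hB, hM, hA, hsum]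
  clear hd ht hkA hkB hcost hv hzeros hd0 hB hM hA hsum hkT hL
  split_ifs <;> simp_all
  omega
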